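-- pv_equiv track=rewrite | github.com/TAMU-CPT/galaxy-tools | tools/SAR/SAR_functions.py | charge_check
-- ===== SOURCE A (Python) =====
-- def charge_check(charge_seq,pos_res,neg_res):
--     charge = 0
--     for aa in charge_seq:
--         if aa in pos_res:
--             charge += 1
--         if aa in neg_res:
--             charge -= 1
--     return charge
-- ===== SOURCE B (Python) =====
-- def charge_check(charge_seq, pos_res, neg_res):
--     counts = {}
--     for aa in charge_seq:
--         counts[aa] = counts.get(aa, 0) + 1
--     return sum(counts.get(r, 0) for r in set(pos_res)) - sum(counts.get(r, 0) for r in set(neg_res))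
-- ===== Notes on version B (the rewrite author's own statement) =====
-- stated objective: alternative
-- what changed: B builds a character-frequency table of the sequence once, then sums the tallied counts over the de-duplicated positive and negative residue sets, instead of scanning the sequence and doing a membership test against each residue string per character.
import Mathlib
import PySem

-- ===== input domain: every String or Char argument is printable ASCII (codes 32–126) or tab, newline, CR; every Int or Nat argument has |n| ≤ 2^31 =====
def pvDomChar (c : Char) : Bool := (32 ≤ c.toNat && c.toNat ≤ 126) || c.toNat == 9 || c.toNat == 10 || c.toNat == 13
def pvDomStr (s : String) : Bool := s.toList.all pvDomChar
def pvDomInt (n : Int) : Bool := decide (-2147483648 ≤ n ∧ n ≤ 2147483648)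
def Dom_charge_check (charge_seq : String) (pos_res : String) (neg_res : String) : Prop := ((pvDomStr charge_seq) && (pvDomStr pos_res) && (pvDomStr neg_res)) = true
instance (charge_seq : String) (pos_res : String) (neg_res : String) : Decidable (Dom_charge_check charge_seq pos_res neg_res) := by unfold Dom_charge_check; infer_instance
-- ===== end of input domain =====

-- B replaces A's per-character membership scans by one frequency table of the sequence,
-- summed over the de-duplicated residue sets (alternative decomposition, same results).

-- ===== PORT A =====
-- 'aa in pos_res' with aa a single character is exactly character membership (exact on all inputs).
def charge_check (charge_seq : String) (pos_res : String) (neg_res : String) : Int :=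
  charge_seq.toList.foldl (fun charge aa =>
    let charge := if pos_res.toList.contains aa then charge + 1 else charge
    if neg_res.toList.contains aa then charge - 1 else charge) 0

-- ===== PORT B =====
-- counts = {}; for aa in charge_seq: counts[aa] = counts.get(aa, 0) + 1
-- return sum over set(pos_res) minus sum over set(neg_res) (sum is order-independent).
def charge_check_alt (charge_seq : String) (pos_res : String) (neg_res : String) : Int :=
  let counts : PySem.Dict Char Int :=
    charge_seq.toList.foldl (fun d aa => d.insert aa (d.getD aa 0 + 1)) PySem.Dict.empty
  (PySem.Set.ofList pos_res.toList).foldl (fun acc r => acc + counts.getD r 0) 0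
  - (PySem.Set.ofList neg_res.toList).foldl (fun acc r => acc + counts.getD r 0) 0

-- ===== PRECONDITION & SPEC =====
def Spec_charge_check (charge_seq : String) (pos_res : String) (neg_res : String) (out : Int) : Prop := out = charge_check_alt charge_seq pos_res neg_res
instance (charge_seq : String) (pos_res : String) (neg_res : String) (out : Int) : Decidable (Spec_charge_check charge_seq pos_res neg_res out) := by unfold Spec_charge_check; infer_instance

-- ===== CLAIM (what is proved, stated in full; the proofs are below) =====
def Claim_equal_charge_check : Prop := ∀ (charge_seq : String) (pos_res : String) (neg_res : String), Dom_charge_check charge_seq pos_res neg_res → Spec_charge_check charge_seq pos_res neg_res (charge_check charge_seq pos_res neg_res)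

-- ===== LEMMAS AND PROOFS =====

-- A's loop computes (#chars in P) − (#chars in N), accumulator generalized.
theorem chargeLoop_eq (P N : List Char) :
    ∀ (s : List Char) (c : Int),
      s.foldl (fun charge aa =>
        let charge := if P.contains aa then charge + 1 else charge
        if N.contains aa then charge - 1 else charge) c
      = c + (s.countP (fun a => P.contains a) : Int) - (s.countP (fun a => N.contains a) : Int) := by
  intro s
  induction s with
  | nil => intro c; simp
  | cons a s ih =>
    intro c
    rw [List.foldl_cons, ih, List.countP_cons, List.countP_cons]
    by_cases hP : a ∈ P <;> by_cases hN : a ∈ N <;>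
      simp [hP, hN] <;> push_cast <;> ring

-- a 0/1-sum over Q is a countP
theorem sum_ite_eq_countP (Q : List Char) (a : Char) :
    (Q.map (fun c => if c = a then (1 : Int) else 0)).sum
      = ((Q.countP (fun c => c = a) : Nat) : Int) := by
  induction Q with
  | nil => simp
  | cons q Q ih =>
    rw [List.map_cons, List.sum_cons, List.countP_cons, ih]
    by_cases h : q = a <;> simp [h] <;> push_cast <;> ring

-- in a duplicate-free list, the number of matches of a is its membership indicator
theorem countP_eq_of_nodup (Q : List Char) (a : Char) (hQ : Q.Nodup) :
    Q.countP (fun c => decide (c = a)) = if a ∈ Q then 1 else 0 := by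
  induction Q with
  | nil => simp
  | cons q Q ih =>
    have hq : q ∉ Q := (List.nodup_cons.mp hQ).1
    have hQ' : Q.Nodup := (List.nodup_cons.mp hQ).2
    rw [List.countP_cons, ih hQ']
    by_cases h : q = a
    · have hz : ¬ a ∈ Q := fun hmem => hq (by rw [h]; exact hmem)
      simp [h, hz]
    · have hmem : (a ∈ q :: Q) ↔ a ∈ Q := by
        constructor
        · intro hm
          rcases List.mem_cons.mp hm with h' | h'
          · exact absurd h'.symm h
          · exact h'
        · exact fun h' => List.mem_cons_of_mem _ h'
      by_cases hm : a ∈ Q <;> simp [hm, hmem, h]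

-- Summing the sequence's per-character counts over a duplicate-free residue list
-- equals counting the sequence's characters that lie in that list.
theorem sum_count_eq_countP (Q : List Char) (hQ : Q.Nodup) :
    ∀ s : List Char,
      (Q.map (fun c => ((s.count c : Nat) : Int))).sum
        = (s.countP (fun a => Q.contains a) : Int) := by
  intro s
  induction s with
  | nil => simp
  | cons a s ih =>
    have hcount : ∀ c : Char, ((a :: s).count c : Int)
        = (s.count c : Int) + (if c = a then 1 else 0) := by
      intro c
      by_cases h : c = a
      · simp [List.count_cons, h]
      · simp [List.count_cons, h, Ne.symm h]
    have hsplit : (Q.map (fun c => (((a :: s).count c : Nat) : Int))).sum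
        = (Q.map (fun c => ((s.count c : Nat) : Int))).sum
          + (Q.map (fun c => if c = a then (1 : Int) else 0)).sum := by
      calc (Q.map (fun c => (((a :: s).count c : Nat) : Int))).sum
          = (Q.map (fun c => ((s.count c : Nat) : Int) + (if c = a then 1 else 0))).sum := by
            simp only [hcount]
        _ = _ := by rw [← List.sum_map_add]
    rw [hsplit, ih, sum_ite_eq_countP, countP_eq_of_nodup Q a hQ, List.countP_cons]
    by_cases hm : a ∈ Q <;> simp [hm] <;> push_cast <;> ring

theorem countP_ofList_eq (Q : List Char) (s : List Char) :
    s.countP (fun a => List.contains (PySem.Set.ofList Q) a) = s.countP (fun a => Q.contains a) :=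
  List.countP_congr (fun a _ => by simp [PySem.Set.mem_ofList])

theorem side_sum (s Q : List Char) :
    (PySem.Set.ofList Q).foldl (fun acc r => acc + (PySem.Dict.counter s).getD r 0) 0
      = (s.countP (fun a => Q.contains a) : Int) := by
  rw [PySem.List.foldl_add (g := fun r => (PySem.Dict.counter s).getD r 0)]
  have hmap : (PySem.Set.ofList Q).map (fun r => (PySem.Dict.counter s).getD r 0)
      = (PySem.Set.ofList Q).map (fun c => ((s.count c : Nat) : Int)) := by
    simp [PySem.Dict.getD_counter]
  rw [hmap, sum_count_eq_countP _ (PySem.Set.nodup_ofList Q) s, countP_ofList_eq]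
  omega

-- ===== VERDICT (by name: the statement is the Claim_ definition above) =====
theorem charge_check_spec : Claim_equal_charge_check := by
  intro cs ps ns _
  show charge_check cs ps ns = charge_check_alt cs ps ns
  have hB : charge_check_alt cs ps ns =
      (PySem.Set.ofList ps.toList).foldl
          (fun acc r => acc + (PySem.Dict.counter cs.toList).getD r 0) 0
        - (PySem.Set.ofList ns.toList).foldl
          (fun acc r => acc + (PySem.Dict.counter cs.toList).getD r 0) 0 := rfl
  rw [hB, side_sum, side_sum]
  unfold charge_check
  rw [chargeLoop_eq]
  omega
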